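-- pv_equiv track=rewrite | github.com/alexwernick/arc-2024 | arc_2024/representations/interpreter.py | _uniform_to_seperators
-- ===== SOURCE A (Python) =====
-- from typing import List, Optional
--
-- def _uniform_to_seperators(uniform: List[int]) -> List[int]:
--     seperators = []
--     if len(uniform) <= 1:
--         return uniform
--
--     for index, row in enumerate(uniform):
--         is_next_to_previous = False
--         is_next_to_next = False
--         if index == 0:
--             is_next_to_next = uniform[index + 1] - row == 1
--         elif index == len(uniform) - 1:
--             is_next_to_previous = row - uniform[index - 1] == 1
--         else:
--             is_next_to_previous = row - uniform[index - 1] == 1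
--             is_next_to_next = uniform[index + 1] - row == 1
--
--         if not is_next_to_previous and not is_next_to_next:
--             seperators.append(row)
--
--     return seperators
-- ===== SOURCE B (Python) =====
-- from typing import List
--
--
-- def _uniform_to_seperators(uniform: List[int]) -> List[int]:
--     # Run-length grouping: split the list into maximal runs of consecutive
--     # values (next - prev == 1); an element is a separator iff its run has
--     # length 1.
--     seperators = []
--     i, n = 0, len(uniform)
--     while i < n:
--         j = i + 1
--         while j < n and uniform[j] - uniform[j - 1] == 1:
--             j += 1            # extend the current run
--         if j == i + 1:        # run of length 1 -> isolated element
--             seperators.append(uniform[i])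
--         i = j                 # jump to the start of the next run
--     return seperators
-- ===== Notes on version B (the rewrite author's own statement) =====
-- stated objective: alternative
-- what changed: Replaces A's per-element loop with first/last-index branching and left/right adjacency tests by run-length grouping: an outer loop that finds each maximal run of consecutive values with an inner scan and emits the run's element only when the run has length 1.
import Mathlib
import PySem

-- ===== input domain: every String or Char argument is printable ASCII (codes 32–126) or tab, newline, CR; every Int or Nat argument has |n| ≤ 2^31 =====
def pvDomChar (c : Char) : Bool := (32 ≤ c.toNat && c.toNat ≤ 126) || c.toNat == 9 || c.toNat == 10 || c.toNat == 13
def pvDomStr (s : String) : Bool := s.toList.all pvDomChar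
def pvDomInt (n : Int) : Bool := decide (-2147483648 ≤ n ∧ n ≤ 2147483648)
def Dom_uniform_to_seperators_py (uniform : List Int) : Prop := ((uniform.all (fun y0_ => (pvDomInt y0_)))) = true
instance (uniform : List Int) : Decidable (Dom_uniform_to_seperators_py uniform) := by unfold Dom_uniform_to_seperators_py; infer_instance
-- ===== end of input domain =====

-- B replaces A's per-element loop with first/last branching by run-length grouping:
-- find each maximal run of consecutive values, keep only singleton runs (alternative).

-- ===== PORT A =====
-- Loop-body predicate of A (the if/elif/else chain computing the two flags);
-- uniform[index-1] / uniform[index+1] are always in range on the branches taken,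
-- so pyGetD with default 0 is exact there.
def pvCondA (uniform : List Int) (index row : Int) : Bool :=
  let flags :=
    if index = 0 then
      (false, decide (PySem.List.pyGetD uniform (index + 1) 0 - row = 1))
    else if index = PySem.List.len uniform - 1 then
      (decide (row - PySem.List.pyGetD uniform (index - 1) 0 = 1), false)
    else
      (decide (row - PySem.List.pyGetD uniform (index - 1) 0 = 1),
       decide (PySem.List.pyGetD uniform (index + 1) 0 - row = 1))
  !flags.1 && !flags.2

def uniform_to_seperators_py (uniform : List Int) : List Int :=
  if PySem.List.len uniform ≤ 1 then uniform
  else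
    (PySem.List.enumerate uniform).foldl
      (fun seperators p =>
        if pvCondA uniform p.1 p.2 then seperators ++ [p.2] else seperators) []

-- ===== PORT B =====
-- B's inner while loop: starting after element x, how far does the consecutive run
-- extend (k = number of further run members) and what remains after the run.
-- Source B scans with indices i..j over the same list; here the index scan is the
-- structural recursion on the suffix, returning (j - i - 1, uniform[j:]).
def pvTakeRun : Int → List Int → Nat × List Int
  | _, [] => (0, [])
  | x, y :: t =>
    if y - x = 1 then
      let p := pvTakeRun y t
      (p.1 + 1, p.2)
    else (0, y :: t)

lemma pvTakeRun_len : ∀ (xs : List Int) (x : Int), (pvTakeRun x xs).2.length ≤ xs.length := by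
  intro xs
  induction xs with
  | nil => intro x; simp [pvTakeRun]
  | cons y t ih =>
    intro x
    by_cases h : y - x = 1
    · simp only [pvTakeRun, if_pos h]
      exact le_trans (ih y) (by simp)
    · simp [pvTakeRun, if_neg h]

-- B's outer while loop: process one maximal run per step, emit its element iff
-- the run has length 1 (run continuation k = 0), then continue after the run.
def uniform_to_seperators_py_alt : List Int → List Int
  | [] => []
  | x :: xs =>
    let p := pvTakeRun x xs
    (if p.1 = 0 then [x] else []) ++ uniform_to_seperators_py_alt p.2
termination_by u => u.length
decreasing_by
  exact Nat.lt_succ_of_le (pvTakeRun_len xs x)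

-- ===== PRECONDITION & SPEC =====
def Spec_uniform_to_seperators_py (uniform : List Int) (out : List Int) : Prop := out = uniform_to_seperators_py_alt uniform
instance (uniform : List Int) (out : List Int) : Decidable (Spec_uniform_to_seperators_py uniform out) := by unfold Spec_uniform_to_seperators_py; infer_instance

-- ===== CLAIM (what is proved, stated in full; the proofs are below) =====
def Claim_equal_uniform_to_seperators_py : Prop := ∀ (uniform : List Int), Dom_uniform_to_seperators_py uniform → Spec_uniform_to_seperators_py uniform (uniform_to_seperators_py uniform)

-- ===== LEMMAS AND PROOFS =====

-- "x is followed by a consecutive next element" for the head of xs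
def pvNext (x : Int) (xs : List Int) : Bool :=
  match xs with
  | [] => false
  | y :: _ => decide (y - x = 1)

-- reference recursion: l = "head is connected to the previous element"
def pvG : List Int → Bool → List Int
  | [], _ => []
  | x :: xs, l => (if !l && !(pvNext x xs) then [x] else []) ++ pvG xs (pvNext x xs)

-- ---- B side ----
lemma takeRun_of_not_next (x : Int) (xs : List Int) (h : pvNext x xs = false) :
    pvTakeRun x xs = (0, xs) := by
  cases xs with
  | nil => rfl
  | cons y t =>
    simp only [pvNext, decide_eq_false_iff_not] at h
    simp [pvTakeRun, h]

-- inside a run (flag true) nothing is emitted until the run ends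
lemma pvG_run : ∀ (xs : List Int) (x : Int), pvG (x :: xs) true = pvG (pvTakeRun x xs).2 false := by
  intro xs
  induction xs with
  | nil => intro x; rfl
  | cons y t ih =>
    intro x
    by_cases h : y - x = 1
    · have hn : pvNext x (y :: t) = true := by simp [pvNext, h]
      calc pvG (x :: y :: t) true
          = pvG (y :: t) (pvNext x (y :: t)) := by simp [pvG]
        _ = pvG (y :: t) true := by rw [hn]
        _ = pvG (pvTakeRun y t).2 false := ih y
        _ = pvG (pvTakeRun x (y :: t)).2 false := by simp [pvTakeRun, h]
    · have hn : pvNext x (y :: t) = false := by simp [pvNext, h]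
      calc pvG (x :: y :: t) true
          = pvG (y :: t) (pvNext x (y :: t)) := by simp [pvG]
        _ = pvG (pvTakeRun x (y :: t)).2 false := by rw [hn]; simp [pvTakeRun, h]

lemma pvG_eq_alt_aux : ∀ (n : Nat) (u : List Int), u.length ≤ n →
    pvG u false = uniform_to_seperators_py_alt u := by
  intro n
  induction n with
  | zero =>
    intro u hu
    match u, hu with
    | [], _ => simp [pvG, uniform_to_seperators_py_alt]
  | succ n ih =>
    intro u hu
    match u with
    | [] => simp [pvG, uniform_to_seperators_py_alt]
    | x :: xs =>
      cases hnx : pvNext x xs with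
      | false =>
        have htr := takeRun_of_not_next x xs hnx
        rw [show pvG (x :: xs) false
              = (if !false && !(pvNext x xs) then [x] else []) ++ pvG xs (pvNext x xs) from rfl,
            hnx, uniform_to_seperators_py_alt, htr]
        simp only [Bool.not_false, Bool.and_self, if_true]
        rw [ih xs (by simpa using Nat.lt_succ_iff.mp (by simpa using hu))]
      | true =>
        cases xs with
        | nil => simp [pvNext] at hnx
        | cons y t =>
          have hy : y - x = 1 := by simpa [pvNext] using hnx
          have hlen : (pvTakeRun y t).2.length ≤ n := by
            have := pvTakeRun_len t y
            simp only [List.length_cons] at hu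
            omega
          calc pvG (x :: y :: t) false
              = pvG (y :: t) (pvNext x (y :: t)) := by simp [pvG, hnx]
            _ = pvG (y :: t) true := by rw [hnx]
            _ = pvG (pvTakeRun y t).2 false := pvG_run t y
            _ = uniform_to_seperators_py_alt (pvTakeRun y t).2 := ih _ hlen
            _ = uniform_to_seperators_py_alt (x :: y :: t) := by
                  rw [uniform_to_seperators_py_alt]
                  simp [pvTakeRun, hy]

lemma alt_eq_pvG (u : List Int) : uniform_to_seperators_py_alt u = pvG u false :=
  (pvG_eq_alt_aux u.length u le_rfl).symm

-- ---- A side ----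
-- flag for the head of v when the elements before v are pre
def pvFlag (pre v : List Int) : Bool :=
  match pre.getLast?, v.head? with
  | some a, some y => decide (y - a = 1)
  | _, _ => false

lemma pvFlag_concat (pre : List Int) (x : Int) (xs : List Int) :
    pvFlag (pre ++ [x]) xs = pvNext x xs := by
  cases xs <;> simp [pvFlag, pvNext]

lemma pvCondA_eval (pre : List Int) (x : Int) (xs : List Int)
    (h2 : 2 ≤ (pre ++ x :: xs).length) :
    pvCondA (pre ++ x :: xs) (pre.length : Int) x
      = (!(pvFlag pre (x :: xs)) && !(pvNext x xs)) := by
  have hlen : PySem.List.len (pre ++ x :: xs) = (pre.length : Int) + 1 + xs.length := by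
    simp [PySem.List.len_eq]; ring
  unfold pvCondA
  rcases List.eq_nil_or_concat pre with hpre | ⟨p, a, hpre⟩
  · subst hpre
    cases xs with
    | nil => simp at h2
    | cons y t =>
      simp only [List.length_nil, Nat.cast_zero, List.nil_append]
      have hget : PySem.List.pyGetD (x :: y :: t) ((0 : Int) + 1) 0 = y := by
        have : ((0 : Int) + 1) = ((1 : Nat) : Int) := by norm_num
        rw [this, PySem.List.pyGetD_natCast]
        rfl
      rw [hget]
      simp [pvFlag, pvNext]
  · subst hpre
    simp only [List.concat_eq_append] at h2 hlen ⊢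
    have hne : ((p ++ [a]).length : Int) ≠ 0 := by
      simp only [List.length_append, List.length_cons, List.length_nil]
      push_cast
      omega
    rw [if_neg hne]
    have hprev : PySem.List.pyGetD ((p ++ [a]) ++ x :: xs) (((p ++ [a]).length : Int) - 1) 0 = a := by
      have hc : ((p ++ [a]).length : Int) - 1 = ((p.length : Nat) : Int) := by
        simp [List.length_append]
      rw [hc, PySem.List.pyGetD_natCast]
      have : (p ++ [a]) ++ x :: xs = p ++ (a :: (x :: xs)) := by simp
      rw [this, List.getD_eq_getElem?_getD, List.getElem?_append_right (by omega)]
      simp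
    have hflag : pvFlag (p ++ [a]) (x :: xs) = decide (x - a = 1) := by
      simp [pvFlag]
    cases xs with
    | nil =>
      rw [if_pos (by rw [hlen]; simp)]
      rw [hprev]
      simp [hflag, pvNext]
    | cons y t =>
      have hnat : ((p ++ [a]).length : Int) ≠ PySem.List.len ((p ++ [a]) ++ x :: y :: t) - 1 := by
        rw [hlen]; simp; omega
      rw [if_neg hnat]
      have hnext : PySem.List.pyGetD ((p ++ [a]) ++ x :: y :: t) (((p ++ [a]).length : Int) + 1) 0 = y := by
        have hc : ((p ++ [a]).length : Int) + 1 = ((((p ++ [a]) ++ [x]).length : Nat) : Int) := by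
          simp only [List.length_append, List.length_cons, List.length_nil]
          push_cast
          ring
        rw [hc, PySem.List.pyGetD_natCast]
        have : ((p ++ [a]) ++ x :: y :: t) = (((p ++ [a]) ++ [x]) ++ (y :: t)) := by simp
        rw [this, List.getD_eq_getElem?_getD, List.getElem?_append_right (by omega)]
        simp
      rw [hprev, hnext]
      simp [hflag, pvNext]

lemma foldl_shape (u : List Int) (l : List (Int × Int)) (init : List Int) :
    l.foldl (fun s p => if pvCondA u p.1 p.2 then s ++ [p.2] else s) init
      = init ++ l.foldl (fun s p => if pvCondA u p.1 p.2 then s ++ [p.2] else s) [] := by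
  rw [PySem.List.foldl_append_if, PySem.List.foldl_append_if]
  simp

lemma A_gen (u : List Int) (h2 : 2 ≤ u.length) : ∀ (v pre : List Int), u = pre ++ v →
    ((PySem.List.enumerate v (pre.length : Int)).foldl
      (fun seperators p => if pvCondA u p.1 p.2 then seperators ++ [p.2] else seperators) [])
      = pvG v (pvFlag pre v) := by
  intro v
  induction v with
  | nil => intro pre _; rfl
  | cons x xs ih =>
    intro pre hu
    rw [PySem.List.enumerate_cons, List.foldl_cons, foldl_shape]
    have hcast : (pre.length : Int) + 1 = (((pre ++ [x]).length : Nat) : Int) := by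
      simp [List.length_append]
    rw [hcast, ih (pre ++ [x]) (by simp [hu])]
    have hcond := pvCondA_eval pre x xs (by rw [← hu]; exact h2)
    rw [hu, hcond, pvFlag_concat]
    rw [show pvG (x :: xs) (pvFlag pre (x :: xs))
          = (if !(pvFlag pre (x :: xs)) && !(pvNext x xs) then [x] else [])
              ++ pvG xs (pvNext x xs) from rfl]
    by_cases h : (!(pvFlag pre (x :: xs)) && !(pvNext x xs)) = true
    · rw [if_pos h, if_pos h]
      simp
    · rw [if_neg h, if_neg h]

lemma A_eq_pvG (u : List Int) : uniform_to_seperators_py u = pvG u false := by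
  unfold uniform_to_seperators_py
  by_cases h : PySem.List.len u ≤ 1
  · simp only [h, if_true]
    simp only [PySem.List.len_eq] at h
    match u, h with
    | [], _ => rfl
    | [x], _ => rfl
  · simp only [h, if_false]
    simp only [PySem.List.len_eq] at h
    have := A_gen u (by omega) u [] rfl
    simpa [pvFlag, PySem.List.enumerate] using this

-- ===== VERDICT (by name: the statement is the Claim_ definition above) =====
theorem uniform_to_seperators_py_spec : Claim_equal_uniform_to_seperators_py := by
  intro u _
  unfold Spec_uniform_to_seperators_py
  rw [A_eq_pvG, alt_eq_pvG]
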